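-- pv_equiv track=rewrite | github.com/LDN-reece/LandIntel | app/src/fetchers/boundaries.py | _find_name_column
-- ===== SOURCE A (Python) =====
-- from typing import Any
--
-- def _find_name_column(columns: Any) -> str | None:
--     """Return the most likely authority name column."""
--
--     lookup = {str(column).lower(): str(column) for column in columns}
--     for candidate in ("local_authority", "authority_name", "name", "lad23nm", "ca_name"):
--         if candidate in lookup:
--             return lookup[candidate]
--     for candidate, original in lookup.items():
--         if "name" in candidate:
--             return original
--     return None
-- ===== SOURCE B (Python) =====
-- def _find_name_column(columns):
--     """Return the most likely authority name column."""
--     lookup = {str(column).lower(): str(column) for column in columns}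
--     rank = {"local_authority": 0, "authority_name": 1, "name": 2,
--             "lad23nm": 3, "ca_name": 4}
--     best = None  # (rank, original) with the smallest rank seen, first wins ties
--     for key, original in lookup.items():
--         r = rank.get(key)
--         if r is None:
--             if "name" not in key:
--                 continue
--             r = 5
--         if best is None or r < best[0]:
--             best = (r, original)
--     return None if best is None else best[1]
-- ===== Notes on version B (the rewrite author's own statement) =====
-- stated objective: alternative
-- what changed: A probes the dict for five priority candidates and then rescans the items for a 'name' substring; B builds a rank table and makes a single pass over the dict items, keeping the entry with the smallest rank (first wins ties).
import Mathlib
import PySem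

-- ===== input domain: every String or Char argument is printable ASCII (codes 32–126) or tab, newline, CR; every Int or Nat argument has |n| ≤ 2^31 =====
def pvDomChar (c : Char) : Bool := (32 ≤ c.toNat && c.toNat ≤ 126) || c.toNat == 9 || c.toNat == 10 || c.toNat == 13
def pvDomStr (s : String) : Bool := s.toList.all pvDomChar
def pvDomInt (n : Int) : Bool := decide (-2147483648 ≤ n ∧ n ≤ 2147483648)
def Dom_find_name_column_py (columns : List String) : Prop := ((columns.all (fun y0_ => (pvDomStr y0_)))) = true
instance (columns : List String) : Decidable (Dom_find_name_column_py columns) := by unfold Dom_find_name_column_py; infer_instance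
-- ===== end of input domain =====

-- B replaces A's two sequential scans (five dict probes, then a substring pass) by a single
-- pass over the dict items scoring each key with a rank table (objective: alternative decomposition).

-- shared by both ports: the dict comprehension {str(c).lower(): str(c) for c in columns}
def pvLookup (columns : List String) : PySem.Dict String String :=
  columns.foldl (fun d c => d.insert (PySem.Str.lower c) c) PySem.Dict.empty

-- ===== PORT A =====
def fncCandidates : List String :=
  ["local_authority", "authority_name", "name", "lad23nm", "ca_name"]

-- first loop of A: return lookup[candidate] for the first candidate present
def fncLoop1 (d : PySem.Dict String String) : List String → Option String
  | [] => none
  | c :: cs =>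
    match d.get? c with
    | some v => some v
    | none => fncLoop1 d cs

-- second loop of A: first item whose key contains "name"
def fncLoop2 : List (String × String) → Option String
  | [] => none
  | (k, v) :: rest => if PySem.Str.isIn "name" k then some v else fncLoop2 rest

def find_name_column_py (columns : List String) : Option String :=
  let lookup := pvLookup columns
  match fncLoop1 lookup fncCandidates with
  | some v => some v
  | none => fncLoop2 lookup.items

-- ===== PORT B =====
def fncRank : PySem.Dict String Int :=
  PySem.Dict.ofList
    [("local_authority", 0), ("authority_name", 1), ("name", 2), ("lad23nm", 3), ("ca_name", 4)]

-- loop body of B: r = rank.get(key) (else 5 if "name" in key else skip); keep smaller rank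
def fncRankOf (key : String) : Option Int :=
  match fncRank.get? key with
  | some r => some r
  | none => if PySem.Str.isIn "name" key then some 5 else none

def fncStep (best : Option (Int × String)) (kv : String × String) : Option (Int × String) :=
  match fncRankOf kv.1 with
  | none => best
  | some r =>
    match best with
    | none => some (r, kv.2)
    | some p => if r < p.1 then some (r, kv.2) else best

def find_name_column_py_alt (columns : List String) : Option String :=
  let lookup := pvLookup columns
  match lookup.items.foldl fncStep none with
  | none => none
  | some p => some p.2

-- ===== PRECONDITION & SPEC =====
def Spec_find_name_column_py (columns : List String) (out : Option String) : Prop := out = find_name_column_py_alt columns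
instance (columns : List String) (out : Option String) : Decidable (Spec_find_name_column_py columns out) := by unfold Spec_find_name_column_py; infer_instance

-- ===== CLAIM (what is proved, stated in full; the proofs are below) =====
def Claim_equal_find_name_column_py : Prop := ∀ (columns : List String), Dom_find_name_column_py columns → Spec_find_name_column_py columns (find_name_column_py columns)

-- ===== LEMMAS AND PROOFS =====

-- proof-side recursive version of B's fold (combining from the right, earlier entry wins ties)
def gBest : List (String × String) → Option (Int × String)
  | [] => none
  | kv :: t =>
    match fncRankOf kv.1 with
    | none => gBest t
    | some r =>
      match gBest t with
      | none => some (r, kv.2)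
      | some p => if p.1 < r then some p else some (r, kv.2)

def mergeAcc (a b : Option (Int × String)) : Option (Int × String) :=
  match a with
  | none => b
  | some p =>
    match b with
    | none => some p
    | some q => if q.1 < p.1 then some q else some p

theorem foldl_step_eq (L : List (String × String)) :
    ∀ acc, L.foldl fncStep acc = mergeAcc acc (gBest L) := by
  induction L with
  | nil => intro acc; cases acc <;> rfl
  | cons kv t ih =>
    intro acc
    rw [List.foldl_cons, ih]
    cases hr : fncRankOf kv.1 with
    | none => simp [mergeAcc, gBest, fncStep, hr]
    | some r =>
      cases acc with
      | none =>
        cases hg : gBest t <;>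
          simp [mergeAcc, gBest, fncStep, hr, hg]
      | some p =>
        cases hg : gBest t with
        | none =>
          simp only [mergeAcc, gBest, fncStep, hr, hg]
          split_ifs <;> rfl
        | some q =>
          by_cases h1 : r < p.1 <;> by_cases h2 : q.1 < r <;> by_cases h3 : q.1 < p.1 <;>
            simp [mergeAcc, gBest, fncStep, hr, hg, h1, h2, h3] <;> omega

theorem rk_eq (k : String) : fncRankOf k =
    if k = "local_authority" then some 0 else
    if k = "authority_name" then some 1 else
    if k = "name" then some 2 else
    if k = "lad23nm" then some 3 else
    if k = "ca_name" then some 4 else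
    if PySem.Str.isIn "name" k then some 5 else none := by
  by_cases h0 : k = "local_authority"
  · subst h0; decide
  rw [if_neg h0]
  by_cases h1 : k = "authority_name"
  · subst h1; decide
  rw [if_neg h1]
  by_cases h2 : k = "name"
  · subst h2; decide
  rw [if_neg h2]
  by_cases h3 : k = "lad23nm"
  · subst h3; decide
  rw [if_neg h3]
  by_cases h4 : k = "ca_name"
  · subst h4; decide
  rw [if_neg h4]
  have g0 : ¬("local_authority" = k) := fun h => h0 h.symm
  have g1 : ¬("authority_name" = k) := fun h => h1 h.symm
  have g2 : ¬("name" = k) := fun h => h2 h.symm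
  have g3 : ¬("lad23nm" = k) := fun h => h3 h.symm
  have g4 : ¬("ca_name" = k) := fun h => h4 h.symm
  have hd : fncRank = PySem.Dict.mk
      [("local_authority", 0), ("authority_name", 1), ("name", 2), ("lad23nm", 3), ("ca_name", 4)] := by
    decide
  have hget : fncRank.get? k = none := by
    rw [hd]
    simp [beq_iff_eq, g0, g1, g2, g3, g4, PySem.Dict.get?]
  unfold fncRankOf
  rw [hget]

theorem rk_inv {k : String} {r : Int} (h : fncRankOf k = some r) :
    (r = 0 ∧ k = "local_authority") ∨ (r = 1 ∧ k = "authority_name") ∨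
    (r = 2 ∧ k = "name") ∨ (r = 3 ∧ k = "lad23nm") ∨ (r = 4 ∧ k = "ca_name") ∨
    (r = 5 ∧ PySem.Str.isIn "name" k = true) := by
  rw [rk_eq] at h
  split_ifs at h <;> simp_all

theorem rk_bounds {k : String} {r : Int} (h : fncRankOf k = some r) : 0 ≤ r ∧ r ≤ 5 := by
  rcases rk_inv h with ⟨h, _⟩ | ⟨h, _⟩ | ⟨h, _⟩ | ⟨h, _⟩ | ⟨h, _⟩ | ⟨h, _⟩ <;> omega

theorem rk_none_not_name {k : String} (h : fncRankOf k = none) :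
    PySem.Str.isIn "name" k = false := by
  rw [rk_eq] at h
  split_ifs at h with h0 h1 h2 h3 h4 h5
  simp at h5
  exact h5

theorem rkc0 : fncRankOf "local_authority" = some 0 := by decide
theorem rkc1 : fncRankOf "authority_name" = some 1 := by decide
theorem rkc2 : fncRankOf "name" = some 2 := by decide
theorem rkc3 : fncRankOf "lad23nm" = some 3 := by decide
theorem rkc4 : fncRankOf "ca_name" = some 4 := by decide

theorem gBest_char (L : List (String × String)) :
    (gBest L = none ∧ ∀ p ∈ L, fncRankOf p.1 = none) ∨
    ∃ r v L1 k L2, gBest L = some (r, v) ∧ L = L1 ++ (k, v) :: L2 ∧ fncRankOf k = some r ∧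
      (∀ p ∈ L1, ∀ r', fncRankOf p.1 = some r' → r < r') ∧
      (∀ p ∈ L, ∀ r', fncRankOf p.1 = some r' → r ≤ r') := by
  induction L with
  | nil => left; exact ⟨rfl, by simp⟩
  | cons kv t ih =>
    cases hr : fncRankOf kv.1 with
    | none =>
      rcases ih with ⟨hg, hall⟩ | ⟨r, v, L1, k, L2, hg, hL, hk, hpre, hmin⟩
      · left
        refine ⟨by simp [gBest, hr, hg], ?_⟩
        intro p hp
        rcases List.mem_cons.mp hp with h | h
        · rw [h]; exact hr
        · exact hall p h
      · right
        refine ⟨r, v, kv :: L1, k, L2, by simp [gBest, hr, hg], by rw [hL, List.cons_append],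
          hk, ?_, ?_⟩
        · intro p hp r' hr'
          rcases List.mem_cons.mp hp with h | h
          · rw [h, hr] at hr'; exact absurd hr' (by simp)
          · exact hpre p h r' hr'
        · intro p hp r' hr'
          rcases List.mem_cons.mp hp with h | h
          · rw [h, hr] at hr'; exact absurd hr' (by simp)
          · exact hmin p h r' hr'
    | some r0 =>
      rcases ih with ⟨hg, hall⟩ | ⟨r, v, L1, k, L2, hg, hL, hk, hpre, hmin⟩
      · right
        refine ⟨r0, kv.2, [], kv.1, t, by simp [gBest, hr, hg], by simp, hr, by simp, ?_⟩
        intro p hp r' hr'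
        rcases List.mem_cons.mp hp with h | h
        · rw [h, hr] at hr'; injection hr' with h2; omega
        · rw [hall p h] at hr'; exact absurd hr' (by simp)
      · by_cases hlt : r < r0
        · right
          refine ⟨r, v, kv :: L1, k, L2, by simp [gBest, hr, hg, hlt],
            by rw [hL, List.cons_append], hk, ?_, ?_⟩
          · intro p hp r' hr'
            rcases List.mem_cons.mp hp with h | h
            · rw [h, hr] at hr'
              injection hr' with h2
              omega
            · exact hpre p h r' hr'
          · intro p hp r' hr'
            rcases List.mem_cons.mp hp with h | h
            · rw [h, hr] at hr'
              injection hr' with h2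
              omega
            · exact hmin p h r' hr'
        · right
          refine ⟨r0, kv.2, [], kv.1, t, by simp [gBest, hr, hg, hlt], by simp, hr, by simp, ?_⟩
          intro p hp r' hr'
          rcases List.mem_cons.mp hp with h | h
          · rw [h, hr] at hr'
            injection hr' with h2
            omega
          · have := hmin p h r' hr'
            omega

theorem fncLoop2_none {L : List (String × String)}
    (h : ∀ p ∈ L, PySem.Str.isIn "name" p.1 = false) : fncLoop2 L = none := by
  induction L with
  | nil => rfl
  | cons kv t ih =>
    obtain ⟨a, b⟩ := kv
    have := h (a, b) (by simp)
    simp only [fncLoop2, this, if_neg Bool.false_ne_true]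
    exact ih fun p hp => h p (List.mem_cons_of_mem _ hp)

theorem fncLoop2_append {L1 rest : List (String × String)}
    (h : ∀ p ∈ L1, PySem.Str.isIn "name" p.1 = false) :
    fncLoop2 (L1 ++ rest) = fncLoop2 rest := by
  induction L1 with
  | nil => rfl
  | cons kv t ih =>
    obtain ⟨a, b⟩ := kv
    have := h (a, b) (by simp)
    simp only [List.cons_append, fncLoop2, this, if_neg Bool.false_ne_true]
    exact ih fun p hp => h p (List.mem_cons_of_mem _ hp)

theorem get?_none {L : List (String × String)} {c : String}
    (h : ∀ p ∈ L, p.1 ≠ c) : (PySem.Dict.mk L).get? c = none := by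
  have hf : L.find? (fun p => p.1 == c) = none := by
    rw [List.find?_eq_none]
    intro p hp
    simpa using h p hp
  simp [PySem.Dict.get?, hf]

theorem get?_first {L1 L2 : List (String × String)} {c v : String}
    (h : ∀ p ∈ L1, p.1 ≠ c) :
    (PySem.Dict.mk (L1 ++ (c, v) :: L2)).get? c = some v := by
  induction L1 with
  | nil => simp [PySem.Dict.get?_mk_cons]
  | cons q t ih =>
    obtain ⟨a, b⟩ := q
    have ha : ¬(a = c) := h (a, b) (by simp)
    rw [List.cons_append, PySem.Dict.get?_mk_cons, if_neg (by simpa using ha)]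
    exact ih fun p hp => h p (List.mem_cons_of_mem _ hp)

theorem fncLoop1_none {d : PySem.Dict String String} {cs : List String}
    (h : ∀ c ∈ cs, d.get? c = none) : fncLoop1 d cs = none := by
  induction cs with
  | nil => rfl
  | cons c t ih =>
    simp only [fncLoop1, h c (by simp)]
    exact ih fun c' hc => h c' (List.mem_cons_of_mem _ hc)

theorem A_eq_g (d : PySem.Dict String String) :
    (match fncLoop1 d fncCandidates with
     | some v => some v
     | none => fncLoop2 d.items) = (gBest d.items).map (fun p => p.2) := by
  obtain ⟨L⟩ := d
  show (match fncLoop1 (PySem.Dict.mk L) fncCandidates with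
        | some v => some v
        | none => fncLoop2 L) = (gBest L).map (fun p => p.2)
  rcases gBest_char L with ⟨hg, hall⟩ | ⟨r, v, L1, k, L2, hg, hL, hk, hpre, hmin⟩
  · -- nothing ranked: every key misses all candidates and has no "name"
    have h1 : fncLoop1 (PySem.Dict.mk L) fncCandidates = none := by
      refine fncLoop1_none ?_
      intro c hc
      refine get?_none ?_
      intro p hp he
      have hcand : ∃ i : Int, fncRankOf c = some i := by
        simp only [fncCandidates, List.mem_cons, List.not_mem_nil, or_false] at hc
        rcases hc with h | h | h | h | h <;> subst h
        · exact ⟨0, rkc0⟩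
        · exact ⟨1, rkc1⟩
        · exact ⟨2, rkc2⟩
        · exact ⟨3, rkc3⟩
        · exact ⟨4, rkc4⟩
      obtain ⟨i, hi⟩ := hcand
      rw [← he, hall p hp] at hi
      exact absurd hi (by simp)
    have h2 : fncLoop2 L = none :=
      fncLoop2_none fun p hp => rk_none_not_name (hall p hp)
    rw [h1, hg, h2]
    rfl
  · -- the entry (k, v) of minimal rank r wins on both sides
    have hb := rk_bounds hk
    -- no key of L carries a rank strictly below r
    have hlow : ∀ (c : String) (i : Int), fncRankOf c = some i → i < r →
        (PySem.Dict.mk L).get? c = none := by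
      intro c i hc hi
      refine get?_none ?_
      intro p hp he
      have := hmin p hp i (by rw [he]; exact hc)
      omega
    -- the key k itself is found, with value v
    have hkey : (PySem.Dict.mk L).get? k = some v := by
      rw [hL]
      refine get?_first ?_
      intro p hp he
      have := hpre p hp r (by rw [he]; exact hk)
      omega
    rcases rk_inv hk with ⟨hr, hkk⟩ | ⟨hr, hkk⟩ | ⟨hr, hkk⟩ | ⟨hr, hkk⟩ | ⟨hr, hkk⟩ |
      ⟨hr, hkk⟩ <;> subst hr
    · subst hkk
      simp [fncCandidates, fncLoop1, hkey, hg]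
    · subst hkk
      have e0 := hlow "local_authority" 0 rkc0 (by omega)
      simp [fncCandidates, fncLoop1, e0, hkey, hg]
    · subst hkk
      have e0 := hlow "local_authority" 0 rkc0 (by omega)
      have e1 := hlow "authority_name" 1 rkc1 (by omega)
      simp [fncCandidates, fncLoop1, e0, e1, hkey, hg]
    · subst hkk
      have e0 := hlow "local_authority" 0 rkc0 (by omega)
      have e1 := hlow "authority_name" 1 rkc1 (by omega)
      have e2 := hlow "name" 2 rkc2 (by omega)
      simp [fncCandidates, fncLoop1, e0, e1, e2, hkey, hg]
    · subst hkk
      have e0 := hlow "local_authority" 0 rkc0 (by omega)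
      have e1 := hlow "authority_name" 1 rkc1 (by omega)
      have e2 := hlow "name" 2 rkc2 (by omega)
      have e3 := hlow "lad23nm" 3 rkc3 (by omega)
      simp [fncCandidates, fncLoop1, e0, e1, e2, e3, hkey, hg]
    · -- substring case: no candidate key occurs at all; the second loop finds (k, v)
      have h1 : fncLoop1 (PySem.Dict.mk L) fncCandidates = none := by
        refine fncLoop1_none ?_
        intro c hc
        simp only [fncCandidates, List.mem_cons, List.not_mem_nil, or_false] at hc
        rcases hc with h | h | h | h | h <;> subst h
        · exact hlow _ 0 rkc0 (by omega)
        · exact hlow _ 1 rkc1 (by omega)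
        · exact hlow _ 2 rkc2 (by omega)
        · exact hlow _ 3 rkc3 (by omega)
        · exact hlow _ 4 rkc4 (by omega)
      have h2 : fncLoop2 L = some v := by
        rw [hL]
        rw [fncLoop2_append]
        · simp only [fncLoop2, hkk]
          simp
        · intro p hp
          cases hq : fncRankOf p.1 with
          | none => exact rk_none_not_name hq
          | some i =>
            have h5 := hpre p hp i hq
            have := rk_bounds hq
            omega
      rw [h1, hg, h2]
      rfl

-- ===== VERDICT (by name: the statement is the Claim_ definition above) =====
theorem find_name_column_py_spec : Claim_equal_find_name_column_py := by
  intro columns _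
  show find_name_column_py columns = find_name_column_py_alt columns
  have h1 : find_name_column_py columns =
      (match fncLoop1 (pvLookup columns) fncCandidates with
       | some v => some v
       | none => fncLoop2 (pvLookup columns).items) := rfl
  have h2 : find_name_column_py_alt columns =
      (match (pvLookup columns).items.foldl fncStep none with
       | none => none
       | some p => some p.2) := rfl
  rw [h1, h2, foldl_step_eq, A_eq_g]
  simp only [mergeAcc]
  cases gBest (pvLookup columns).items with
  | none => rfl
  | some p => rfl
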